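-- pv_equiv track=rewrite | github.com/WashingtonYandun/DSA.py | Algo/lists_algo/Level_1.py | peak_all_element
-- ===== SOURCE A (Python) =====
-- def peak_all_element(arr):
--     '''
--     return a list with all the indexes where exist a peak element in the list given,
--     using max()
--     '''
--     arr.append(0)
--     peaks = []
--     for i in range(0, len(arr)-1):
--         if arr[i] > arr[i + 1] and arr[i] > arr[i - 1]:
--             peaks.append(i)
--     arr.pop()
--     return peaks
-- ===== SOURCE B (Python) =====
-- def peak_all_element(arr):
--     # derivative-sign method: build the list of slope signs of the zero-padded
--     # sequence, then a peak index is exactly a +/- sign change.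
--     signs = []
--     prev = 0
--     for x in list(arr) + [0]:
--         signs.append((x > prev) - (x < prev))
--         prev = x
--     return [i for i in range(len(signs) - 1) if signs[i] > 0 and signs[i + 1] < 0]
-- ===== Notes on version B (the rewrite author's own statement) =====
-- stated objective: alternative
-- what changed: B uses the derivative-sign method: a first pass builds the list of slope signs of the zero-padded sequence, then a second pass reports the indices where the sign changes from positive to negative, instead of A's in-place append/pop with neighbour comparisons and negative-index wraparound.
import Mathlib
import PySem

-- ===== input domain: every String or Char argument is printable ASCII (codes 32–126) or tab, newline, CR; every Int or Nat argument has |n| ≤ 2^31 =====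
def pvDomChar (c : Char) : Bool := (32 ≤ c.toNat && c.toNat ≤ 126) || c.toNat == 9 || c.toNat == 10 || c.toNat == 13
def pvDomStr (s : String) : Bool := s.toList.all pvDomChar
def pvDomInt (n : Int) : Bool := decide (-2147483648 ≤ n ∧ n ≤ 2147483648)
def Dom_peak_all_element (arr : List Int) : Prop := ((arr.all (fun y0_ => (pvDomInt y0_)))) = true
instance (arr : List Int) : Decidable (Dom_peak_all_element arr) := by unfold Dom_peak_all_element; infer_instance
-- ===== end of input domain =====

-- B computes peak indices by the derivative-sign method (slope signs of the
-- zero-padded sequence, then +/- sign changes) instead of A's in-place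
-- append/pop with neighbour comparisons (return value only; A's temporary
-- mutation of arr is undone by its pop before it returns).

-- ===== PORT A =====
-- arr.append(0); loop over range(0, len(arr)-1) comparing arr[i] with arr[i+1] and arr[i-1]
-- (arr[i-1] wraps to the appended 0 when i = 0); every index is in range, so pyGetD is exact.
def peak_all_element (arr : List Int) : List Int :=
  let arr2 := arr ++ [0]
  (PySem.List.pyRange 0 ((arr2.length : Int) - 1) 1).foldl
    (fun peaks i =>
      if PySem.List.pyGetD arr2 i 0 > PySem.List.pyGetD arr2 (i + 1) 0 ∧
         PySem.List.pyGetD arr2 i 0 > PySem.List.pyGetD arr2 (i - 1) 0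
      then peaks ++ [i] else peaks) []

-- ===== PORT B =====
-- first pass of Source B: for x in list(arr)+[0]: signs.append((x > prev) - (x < prev)); prev = x
def peak_all_element_alt (arr : List Int) : List Int :=
  let signs := ((arr ++ [0]).foldl
    (fun (st : Int × List Int) x =>
      (x, st.2 ++ [(if x > st.1 then (1 : Int) else 0) - (if x < st.1 then 1 else 0)]))
    (0, [])).2
  -- second pass: [i for i in range(len(signs) - 1) if signs[i] > 0 and signs[i+1] < 0]
  ((List.range (signs.length - 1)).filter
    (fun i => decide (signs.getD i 0 > 0 ∧ signs.getD (i + 1) 0 < 0))).map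
    (fun i => (i : Int))

-- ===== PRECONDITION & SPEC =====
def Spec_peak_all_element (arr : List Int) (out : List Int) : Prop := out = peak_all_element_alt arr
instance (arr : List Int) (out : List Int) : Decidable (Spec_peak_all_element arr out) := by unfold Spec_peak_all_element; infer_instance

-- ===== CLAIM (what is proved, stated in full; the proofs are below) =====
def Claim_equal_peak_all_element : Prop := ∀ (arr : List Int), Dom_peak_all_element arr → Spec_peak_all_element arr (peak_all_element arr)

-- ===== LEMMAS AND PROOFS =====

-- sign of the slope from prev to x, as Source B computes it
def pvSgn (prev x : Int) : Int :=
  (if x > prev then (1 : Int) else 0) - (if x < prev then 1 else 0)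

-- the whole sign list produced by B's first pass
def pvSgnList (prev : Int) : List Int → List Int
  | [] => []
  | x :: rest => pvSgn prev x :: pvSgnList x rest

theorem fold_signs (l : List Int) (prev : Int) (acc : List Int) :
    (l.foldl
      (fun (st : Int × List Int) x =>
        (x, st.2 ++ [(if x > st.1 then (1 : Int) else 0) - (if x < st.1 then 1 else 0)]))
      (prev, acc)).2 = acc ++ pvSgnList prev l := by
  induction l generalizing prev acc with
  | nil => simp [pvSgnList]
  | cons x rest ih => simp [pvSgnList, ih, pvSgn]

theorem sgnList_length (l : List Int) (prev : Int) :
    (pvSgnList prev l).length = l.length := by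
  induction l generalizing prev with
  | nil => rfl
  | cons x rest ih => simp [pvSgnList, ih]

theorem sgnList_getD (l : List Int) (prev : Int) (i : Nat) (h : i < l.length) :
    (pvSgnList prev l).getD i 0 = pvSgn ((prev :: l).getD i 0) (l.getD i 0) := by
  induction l generalizing prev i with
  | nil => simp at h
  | cons x rest ih =>
    cases i with
    | zero => simp [pvSgnList]
    | succ j =>
      simp only [pvSgnList, List.getD_cons_succ]
      simpa using ih x j (by simpa using h)

theorem sgn_pos (p x : Int) : pvSgn p x > 0 ↔ x > p := by
  unfold pvSgn; split_ifs <;> omega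

theorem sgn_neg (p x : Int) : pvSgn p x < 0 ↔ x < p := by
  unfold pvSgn; split_ifs <;> omega

-- A's loop condition at index k equals B's sign-change condition at k
theorem cond_eq (arr : List Int) (k : Nat) (hk : k < arr.length) :
    (decide (PySem.List.pyGetD (arr ++ [0]) (k : Int) 0 > PySem.List.pyGetD (arr ++ [0]) ((k : Int) + 1) 0 ∧
             PySem.List.pyGetD (arr ++ [0]) (k : Int) 0 > PySem.List.pyGetD (arr ++ [0]) ((k : Int) - 1) 0))
    = decide ((pvSgnList 0 (arr ++ [0])).getD k 0 > 0 ∧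
              (pvSgnList 0 (arr ++ [0])).getD (k + 1) 0 < 0) := by
  rw [sgnList_getD _ _ k (by simp; omega), sgnList_getD _ _ (k + 1) (by simp; omega)]
  have h1 : ((k : Int) + 1) = ((k + 1 : Nat) : Int) := by push_cast; ring
  rw [h1, PySem.List.pyGetD_natCast, PySem.List.pyGetD_natCast]
  rw [decide_eq_decide]
  rw [sgn_pos, sgn_neg]
  have hsk : ((0 : Int) :: (arr ++ [0])).getD (k + 1) 0 = (arr ++ [0]).getD k 0 := by simp
  rw [hsk]
  cases k with
  | zero =>
    rw [show ((0 : Nat) : Int) - 1 = -1 by ring, PySem.List.pyGetD_neg_one_append_singleton]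
    simp only [List.getD_cons_zero]
    constructor <;> rintro ⟨h, h2⟩ <;> exact ⟨h2, h⟩
  | succ j =>
    rw [show ((j + 1 : Nat) : Int) - 1 = (j : Int) by push_cast; ring, PySem.List.pyGetD_natCast]
    simp only [List.getD_cons_succ]
    constructor <;> rintro ⟨h, h2⟩ <;> exact ⟨h2, h⟩

theorem flatMap_single {α β : Type} (f : α → β) (l : List α) :
    l.flatMap (fun a => [f a]) = l.map f := by
  induction l with
  | nil => rfl
  | cons x rest ih => simp [List.flatMap_cons, ih]

-- ===== VERDICT (by name: the statement is the Claim_ definition above) =====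
theorem peak_all_element_spec : Claim_equal_peak_all_element := by
  intro arr _
  unfold Spec_peak_all_element peak_all_element peak_all_element_alt
  rw [PySem.List.foldl_append_ite]
  simp only [fold_signs, List.nil_append, sgnList_length, List.length_append,
    List.length_cons, List.length_nil, Nat.add_sub_cancel]
  have hlen : ((arr.length + (0 + 1) : Nat) : Int) - 1 = (arr.length : Int) := by push_cast; ring
  rw [hlen, PySem.List.pyRange_zero_natCast, List.filter_map]
  simp only [List.map_map, Function.comp_def, List.bind_eq_flatMap, List.pure_def, flatMap_single]
  exact congrArg _ (List.filter_congr fun k hk => cond_eq arr k (List.mem_range.mp hk))
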